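-- pv_equiv track=rewrite | github.com/isavita/advent_generated | training_data/reflection-tuning/day24_part1_2017.py | dfs
-- ===== SOURCE A (Python) =====
-- def dfs(components, port, used, strength):
--     max_strength = strength
--     for i, (a, b) in enumerate(components):
--         if i not in used and (a == port or b == port):
--             new_port = b if a == port else a
--             new_strength = strength + a + b
--             used.add(i)
--             max_strength = max(max_strength, dfs(components, new_port, used, new_strength))
--             used.remove(i)
--     return max_strength
-- ===== SOURCE B (Python) =====
-- def dfs(components, port, used, strength):
--     best = strength
--     stack = [(port, used, strength)]
--     while stack:
--         p, u, s = stack.pop()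
--         if s > best:
--             best = s
--         for i, (a, b) in enumerate(components):
--             if i not in u and (a == p or b == p):
--                 stack.append((b if a == p else a, u | {i}, s + a + b))
--     return best
-- ===== Notes on version B (the rewrite author's own statement) =====
-- stated objective: alternative
-- what changed: The recursive backtracking DFS that mutates a shared used-set is replaced by an explicit-stack worklist loop: a running best is updated at every popped state and each eligible extension is pushed as a fresh immutable state, so there is no recursion and no mutation of the caller's set.
import Mathlib
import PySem

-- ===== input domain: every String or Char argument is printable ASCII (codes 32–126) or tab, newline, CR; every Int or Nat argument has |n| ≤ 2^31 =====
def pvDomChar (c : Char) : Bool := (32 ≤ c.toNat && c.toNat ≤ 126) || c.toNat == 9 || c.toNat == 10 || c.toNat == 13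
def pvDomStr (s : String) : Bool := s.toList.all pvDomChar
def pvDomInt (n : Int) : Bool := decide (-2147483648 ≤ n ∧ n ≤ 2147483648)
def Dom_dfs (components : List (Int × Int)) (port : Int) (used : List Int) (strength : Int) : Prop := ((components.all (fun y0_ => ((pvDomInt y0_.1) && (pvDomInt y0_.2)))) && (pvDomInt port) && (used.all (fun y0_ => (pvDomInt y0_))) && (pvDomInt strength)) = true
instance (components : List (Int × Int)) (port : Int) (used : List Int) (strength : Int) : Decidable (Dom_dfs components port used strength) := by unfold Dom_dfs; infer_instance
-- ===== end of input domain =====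

-- B replaces A's recursive backtracking DFS by an explicit-stack worklist loop over
-- immutable states. The equivalence proved here is about the RETURN value: A temporarily
-- add/removes indices in the caller's `used` set during the call, B never mutates it.

-- ===== PORT A =====
-- Fuel-indexed transliteration of A's recursion. The fuel only makes the recursion
-- structural: every recursive call adds a fresh index `i < components.length` to `used`,
-- so fuel `components.length + 1` is never exhausted (fuel-stability is proved below).
def dfsF (fuel : Nat) (components : List (Int × Int)) (port : Int) (used : List Int) (strength : Int) : Int :=
  match fuel with
  | 0 => strength
  | f + 1 =>
    -- for i, (a, b) in enumerate(components): thread max_strength through a foldl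
    (PySem.List.enumerate components).foldl
      (fun max_strength x =>
        if (!(used.contains x.1) && (x.2.1 == port || x.2.2 == port)) = true then
          max max_strength
            (dfsF f components (if (x.2.1 == port) = true then x.2.2 else x.2.1)
              (PySem.Set.add used x.1) (strength + x.2.1 + x.2.2))
        else max_strength)
      strength

def dfs (components : List (Int × Int)) (port : Int) (used : List Int) (strength : Int) : Int :=
  dfsF (components.length + 1) components port used strength

-- ===== PORT B =====
-- number of component indices not yet in `u` (termination measure for the worklist loop)
def unusedCount (n : Nat) (u : List Int) : Nat :=
  ((Finset.range n).filter (fun j : Nat => (j : Int) ∉ u)).card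

-- the states pushed by B's inner `for` loop, in push order
def childStates (components : List (Int × Int)) (p : Int) (u : List Int) (s : Int) :
    List (Int × List Int × Int) :=
  (PySem.List.enumerate components).foldl
    (fun stack x =>
      if (!(u.contains x.1) && (x.2.1 == p || x.2.2 == p)) = true then
        stack ++ [(if (x.2.1 == p) = true then x.2.2 else x.2.1, PySem.Set.union u [x.1], s + x.2.1 + x.2.2)]
      else stack)
    []

-- weight of one stack state; popping a state and pushing its children strictly
-- decreases the total weight (lemma loopB_measure_lt, used by loopB's termination proof)
def stackW (n : Nat) (t : Int × List Int × Int) : Nat :=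
  (n + 1) ^ (unusedCount n t.2.1)

lemma childStates_eq (components : List (Int × Int)) (p : Int) (u : List Int) (s : Int) :
    childStates components p u s =
      ((PySem.List.enumerate components).filter
          (fun x => !(u.contains x.1) && (x.2.1 == p || x.2.2 == p))).map
        (fun x => (if (x.2.1 == p) = true then x.2.2 else x.2.1, PySem.Set.union u [x.1], s + x.2.1 + x.2.2)) :=
  PySem.List.foldl_append_if
    (fun x : Int × Int × Int => !(u.contains x.1) && (x.2.1 == p || x.2.2 == p))
    (fun x : Int × Int × Int => (if (x.2.1 == p) = true then x.2.2 else x.2.1, PySem.Set.union u [x.1], s + x.2.1 + x.2.2))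
    (PySem.List.enumerate components) []

lemma mem_childStates {components : List (Int × Int)} {p : Int} {u : List Int} {s : Int}
    {c : Int × List Int × Int} (hc : c ∈ childStates components p u s) :
    ∃ j : Nat, j < components.length ∧ ((j : Int) ∉ u) ∧ c.2.1 = u ++ [(j : Int)] := by
  rw [childStates_eq] at hc
  obtain ⟨x, hx, rfl⟩ := List.mem_map.1 hc
  obtain ⟨hxe, hcond⟩ := List.mem_filter.1 hx
  obtain ⟨j, hj, rfl⟩ := (PySem.List.mem_enumerate_iff _ _ _).1 hxe
  simp only [Bool.and_eq_true, Bool.not_eq_true'] at hcond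
  have hnm : ((0 + (j : Int))) ∉ u := by
    intro h; have hc2 := hcond.1; simp at hc2; exact hc2 (by simpa using h)
  refine ⟨j, hj, by simpa using hnm, ?_⟩
  have hun : PySem.Set.union u [(0 + (j : Int))] = PySem.Set.add u (0 + (j : Int)) := rfl
  simp only [hun, PySem.Set.add_of_not_mem hnm]
  simp

lemma unusedCount_append {n : Nat} {u : List Int} {j : Nat} (hj : j < n) (hm : (j : Int) ∉ u) :
    unusedCount n (u ++ [(j : Int)]) + 1 = unusedCount n u := by
  unfold unusedCount
  have hset : ((Finset.range n).filter (fun i : Nat => (i : Int) ∉ u ++ [(j : Int)])) =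
      ((Finset.range n).filter (fun i : Nat => (i : Int) ∉ u)).erase j := by
    ext i
    simp only [Finset.mem_filter, Finset.mem_erase, Finset.mem_range, List.mem_append,
      List.mem_singleton, Nat.cast_inj, not_or]
    tauto
  have hmem : j ∈ (Finset.range n).filter (fun i : Nat => (i : Int) ∉ u) := by
    simp [Finset.mem_filter, Finset.mem_range, hj, hm]
  rw [hset, Finset.card_erase_of_mem hmem]
  have hpos : 0 < ((Finset.range n).filter (fun i : Nat => (i : Int) ∉ u)).card :=
    Finset.card_pos.2 ⟨j, hmem⟩
  omega

lemma childStates_length_le (components : List (Int × Int)) (p : Int) (u : List Int) (s : Int) :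
    (childStates components p u s).length ≤ components.length := by
  rw [childStates_eq, List.length_map]
  calc (List.filter _ (PySem.List.enumerate components)).length
      ≤ (PySem.List.enumerate components).length := List.length_filter_le _ _
    _ = components.length := PySem.List.length_enumerate ..

lemma loopB_measure_lt (components : List (Int × Int)) (t : Int × List Int × Int)
    (rest : List (Int × List Int × Int)) :
    (((childStates components t.1 t.2.1 t.2.2).reverse ++ rest).map (stackW components.length)).sum
      < ((t :: rest).map (stackW components.length)).sum := by
  rw [List.map_append, List.sum_append, List.map_reverse, List.sum_reverse, List.map_cons,
    List.sum_cons]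
  have hk : ∀ c ∈ childStates components t.1 t.2.1 t.2.2,
      stackW components.length c = (components.length + 1) ^ (unusedCount components.length t.2.1 - 1)
        ∧ 1 ≤ unusedCount components.length t.2.1 := by
    intro c hc
    obtain ⟨j, hj, hm, hcu⟩ := mem_childStates hc
    have hcnt := unusedCount_append (u := t.2.1) hj hm
    unfold stackW
    rw [hcu]
    exact ⟨by congr 1; omega, by omega⟩
  by_cases hnil : childStates components t.1 t.2.1 t.2.2 = []
  · rw [hnil]
    simp only [List.map_nil, List.sum_nil]
    have : 0 < stackW components.length t := Nat.pow_pos (by omega)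
    omega
  · obtain ⟨c0, hc0⟩ := List.exists_mem_of_ne_nil _ hnil
    have hone : 1 ≤ unusedCount components.length t.2.1 := (hk c0 hc0).2
    have hsum : ((childStates components t.1 t.2.1 t.2.2).map (stackW components.length)).sum
        ≤ (childStates components t.1 t.2.1 t.2.2).length
            * (components.length + 1) ^ (unusedCount components.length t.2.1 - 1) := by
      have := List.sum_le_card_nsmul
        ((childStates components t.1 t.2.1 t.2.2).map (stackW components.length))
        ((components.length + 1) ^ (unusedCount components.length t.2.1 - 1)) (by
          intro x hx
          obtain ⟨c, hc, rfl⟩ := List.mem_map.1 hx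
          exact le_of_eq (hk c hc).1)
      simpa [List.length_map] using this
    have hlen := childStates_length_le components t.1 t.2.1 t.2.2
    have hlt : (childStates components t.1 t.2.1 t.2.2).length
          * (components.length + 1) ^ (unusedCount components.length t.2.1 - 1)
        < stackW components.length t := by
      unfold stackW
      calc (childStates components t.1 t.2.1 t.2.2).length
              * (components.length + 1) ^ (unusedCount components.length t.2.1 - 1)
          ≤ components.length * (components.length + 1) ^ (unusedCount components.length t.2.1 - 1) :=
            Nat.mul_le_mul_right _ hlen
        _ < (components.length + 1) * (components.length + 1) ^ (unusedCount components.length t.2.1 - 1) :=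
            (Nat.mul_lt_mul_right (Nat.pow_pos (by omega))).2 (by omega)
        _ = (components.length + 1) ^ (unusedCount components.length t.2.1 - 1 + 1) := by ring
        _ = (components.length + 1) ^ (unusedCount components.length t.2.1) := by congr 1; omega
    omega

-- the worklist loop: pop the top state, update the running best, push the children
-- (push order then LIFO pop = the reversed child list goes on top of the stack)
def loopB (components : List (Int × Int)) (stack : List (Int × List Int × Int)) (best : Int) : Int :=
  match stack with
  | [] => best
  | t :: rest =>
    loopB components ((childStates components t.1 t.2.1 t.2.2).reverse ++ rest)
      (if t.2.2 > best then t.2.2 else best)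
termination_by (stack.map (stackW components.length)).sum
decreasing_by exact loopB_measure_lt components t rest

def dfs_alt (components : List (Int × Int)) (port : Int) (used : List Int) (strength : Int) : Int :=
  loopB components [(port, used, strength)] strength

-- ===== PRECONDITION & SPEC =====
def Spec_dfs (components : List (Int × Int)) (port : Int) (used : List Int) (strength : Int) (out : Int) : Prop := out = dfs_alt components port used strength
instance (components : List (Int × Int)) (port : Int) (used : List Int) (strength : Int) (out : Int) : Decidable (Spec_dfs components port used strength out) := by unfold Spec_dfs; infer_instance

-- ===== CLAIM (what is proved, stated in full; the proofs are below) =====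
def Claim_equal_dfs : Prop := ∀ (components : List (Int × Int)) (port : Int) (used : List Int) (strength : Int), Dom_dfs components port used strength → Spec_dfs components port used strength (dfs components port used strength)

-- ===== LEMMAS AND PROOFS =====

lemma unusedCount_le (n : Nat) (u : List Int) : unusedCount n u ≤ n := by
  unfold unusedCount
  simpa using Finset.card_filter_le (Finset.range n) _

-- the dfs value of a stack state, at its exact sufficient fuel
def pvVal (components : List (Int × Int)) (t : Int × List Int × Int) : Int :=
  dfsF (unusedCount components.length t.2.1 + 1) components t.1 t.2.1 t.2.2

-- folding a running max distributes over a max'ed-in initial value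
lemma foldl_max_shift {α : Type} (f : α → Int) :
    ∀ (l : List α) (x y : Int),
      l.foldl (fun m c => max m (f c)) (max x y) = max x (l.foldl (fun m c => max m (f c)) y) := by
  intro l
  induction l with
  | nil => intro x y; rfl
  | cons c l ih =>
    intro x y
    simp only [List.foldl_cons, max_assoc]
    exact ih x (max y (f c))

-- a running max is insensitive to reversing the traversal order
lemma foldl_max_reverse {α : Type} (f : α → Int) :
    ∀ (l : List α) (y : Int),
      l.reverse.foldl (fun m c => max m (f c)) y = l.foldl (fun m c => max m (f c)) y := by
  intro l
  induction l with
  | nil => intro y; rfl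
  | cons c l ih =>
    intro y
    rw [List.reverse_cons, List.foldl_append, ih]
    simp only [List.foldl_cons, List.foldl_nil]
    rw [show max y (f c) = max (f c) y from max_comm .., foldl_max_shift]
    exact max_comm ..

-- one unfolding of A's recursion, reshaped as a running max over B's child states
lemma dfsF_succ_eq (f : Nat) (components : List (Int × Int)) (p : Int) (u : List Int) (s : Int) :
    dfsF (f + 1) components p u s =
      (childStates components p u s).foldl
        (fun m c => max m (dfsF f components c.1 c.2.1 c.2.2)) s := by
  rw [childStates_eq, List.foldl_map, List.foldl_filter]
  rfl

lemma le_dfsF_succ (f : Nat) (components : List (Int × Int)) (p : Int) (u : List Int) (s : Int) :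
    s ≤ dfsF (f + 1) components p u s := by
  rw [dfsF_succ_eq]
  exact (PySem.List.le_foldl_max_int _ _ _).1

-- fuel stability: any fuel of at least unusedCount + 1 computes the same value
lemma dfsF_stable :
    ∀ (f g : Nat) (components : List (Int × Int)) (p : Int) (u : List Int) (s : Int),
      unusedCount components.length u ≤ f → unusedCount components.length u ≤ g →
      dfsF (f + 1) components p u s = dfsF (g + 1) components p u s := by
  intro f
  induction f using Nat.strong_induction_on with
  | _ f ih =>
    intro g components p u s hf hg
    show (PySem.List.enumerate components).foldl _ s = (PySem.List.enumerate components).foldl _ s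
    apply PySem.List.foldl_congr_mem
    intro m x hx
    by_cases hcond : (!(u.contains x.1) && (x.2.1 == p || x.2.2 == p)) = true
    · rw [if_pos hcond, if_pos hcond]
      obtain ⟨j, hj, rfl⟩ := (PySem.List.mem_enumerate_iff _ _ _).1 hx
      have hnm : ((0 + (j : Int))) ∉ u := by
        simp only [Bool.and_eq_true, Bool.not_eq_true'] at hcond
        intro h; have hc2 := hcond.1; simp at hc2; exact hc2 (by simpa using h)
      have hnm' : ((j : Int)) ∉ u := by simpa using hnm
      have hcnt := unusedCount_append (u := u) hj hnm'
      have hadd : PySem.Set.add u (0 + (j : Int)) = u ++ [(j : Int)] := by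
        rw [PySem.Set.add_of_not_mem hnm]; simp
      have h1 : 1 ≤ unusedCount components.length u := by omega
      congr 1
      rw [show f = (f - 1) + 1 from by omega, show g = (g - 1) + 1 from by omega, hadd]
      exact ih (f - 1) (by omega) (g - 1) components _ _ _ (by omega) (by omega)
    · rw [if_neg hcond, if_neg hcond]

-- on the child states, full fuel agrees with the state's own exact fuel
lemma dfsF_succ_eq_val (f : Nat) (components : List (Int × Int)) (p : Int) (u : List Int) (s : Int)
    (hf : unusedCount components.length u ≤ f) :
    dfsF (f + 1) components p u s =
      (childStates components p u s).foldl (fun m c => max m (pvVal components c)) s := by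
  rw [dfsF_succ_eq]
  apply PySem.List.foldl_congr_mem
  intro m c hc
  congr 1
  obtain ⟨j, hj, hnm, hcu⟩ := mem_childStates hc
  have hcnt := unusedCount_append (u := u) hj hnm
  have h1 : 1 ≤ unusedCount components.length u := by omega
  unfold pvVal
  rw [show f = (f - 1) + 1 from by omega]
  exact dfsF_stable (f - 1) (unusedCount components.length c.2.1) components _ _ _
    (by rw [hcu]; omega) (le_refl _)

-- the worklist invariant, by strong induction on the stack's total weight
lemma loopB_eq_aux (components : List (Int × Int)) :
    ∀ (N : Nat) (stack : List (Int × List Int × Int)) (best : Int),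
      (stack.map (stackW components.length)).sum ≤ N →
      loopB components stack best = stack.foldl (fun b t => max b (pvVal components t)) best := by
  intro N
  induction N with
  | zero =>
    intro stack best hN
    match stack with
    | [] => rw [loopB]; rfl
    | t :: rest =>
      exfalso
      have : 0 < stackW components.length t := Nat.pow_pos (by omega)
      simp only [List.map_cons, List.sum_cons] at hN
      omega
  | succ N ih =>
    intro stack best hN
    match stack with
    | [] => rw [loopB]; rfl
    | t :: rest =>
      rw [loopB]
      have hlt := loopB_measure_lt components t rest
      rw [ih _ _ (by omega)]
      rw [List.foldl_append, foldl_max_reverse]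
      have hbest : (if t.2.2 > best then t.2.2 else best) = max best t.2.2 := by
        by_cases h : t.2.2 > best
        · simp [h, max_eq_right (le_of_lt h)]
        · simp [h, max_eq_left (not_lt.mp h)]
      rw [hbest, foldl_max_shift]
      rw [← dfsF_succ_eq_val (unusedCount components.length t.2.1) components t.1 t.2.1 t.2.2
            (le_refl _)]
      rfl

-- the worklist invariant: loopB computes the running max of the dfs values of all stacked states
lemma loopB_eq (components : List (Int × Int)) (stack : List (Int × List Int × Int)) (best : Int) :
    loopB components stack best = stack.foldl (fun b t => max b (pvVal components t)) best :=
  loopB_eq_aux components _ stack best (le_refl _)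

-- ===== VERDICT (by name: the statement is the Claim_ definition above) =====
theorem dfs_spec : Claim_equal_dfs := by
  intro components port used strength _
  show dfs components port used strength = dfs_alt components port used strength
  unfold dfs dfs_alt
  rw [loopB_eq]
  have hle := unusedCount_le components.length used
  have h1 : dfsF (components.length + 1) components port used strength
      = pvVal components (port, used, strength) :=
    dfsF_stable components.length (unusedCount components.length used) components port used strength
      hle (le_refl _)
  have h2 : strength ≤ pvVal components (port, used, strength) := by
    unfold pvVal; exact le_dfsF_succ ..
  simp only [List.foldl_cons, List.foldl_nil]
  rw [h1]
  omega
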